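-- pv_equiv track=rewrite | github.com/ariannamethod/molequla | macrogpt_v2.py | extract_candidate_sentences_from_messages
-- ===== SOURCE A (Python) =====
-- def normalize_text(s: str) -> str:
--     s = s.replace("\r", " ").replace("\t", " ")
--     return " ".join(s.split())
--
-- def extract_candidate_sentences_from_messages(msgs):
--     out = []
--     for role, text in msgs:
--         t = normalize_text(text)
--         if not t:
--             continue
--         buf = ""
--         for ch in t:
--             buf += ch
--             if ch in ".!?":
--                 if len(buf.strip()) >= 6:
--                     out.append(buf.strip())
--                 buf = ""
--         if len(buf.strip()) >= 12:
--             out.append(buf.strip())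
--     seen = set()
--     uniq = []
--     for s in out:
--         k = s.lower()
--         if k not in seen:
--             seen.add(k)
--             uniq.append(s)
--     return uniq
-- ===== SOURCE B (Python) =====
-- def normalize_text(s):
--     s = s.replace("\r", " ").replace("\t", " ")
--     return " ".join(s.split())
--
--
-- def _first_delim(t):
--     for j, ch in enumerate(t):
--         if ch in ".!?":
--             return j
--     return None
--
--
-- def extract_candidate_sentences_from_messages(msgs):
--     d = {}
--     for role, text in msgs:
--         t = normalize_text(text)
--         while True:
--             i = _first_delim(t)
--             if i is None:
--                 break
--             s = t[:i + 1].strip()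
--             if len(s) >= 6:
--                 d.setdefault(s.lower(), s)
--             t = t[i + 1:]
--         s = t.strip()
--         if len(s) >= 12:
--             d.setdefault(s.lower(), s)
--     return list(d.values())
-- ===== Notes on version B (the rewrite author's own statement) =====
-- stated objective: alternative
-- what changed: B repeatedly cuts the normalized text at the first '.'/'!'/'?' using index search and slicing instead of A's character-by-character buffer accumulation, and fuses the case-insensitive dedup into a single dict built inline with setdefault (values() at the end) instead of A's separate seen-set + uniq-list second pass.
import Mathlib
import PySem

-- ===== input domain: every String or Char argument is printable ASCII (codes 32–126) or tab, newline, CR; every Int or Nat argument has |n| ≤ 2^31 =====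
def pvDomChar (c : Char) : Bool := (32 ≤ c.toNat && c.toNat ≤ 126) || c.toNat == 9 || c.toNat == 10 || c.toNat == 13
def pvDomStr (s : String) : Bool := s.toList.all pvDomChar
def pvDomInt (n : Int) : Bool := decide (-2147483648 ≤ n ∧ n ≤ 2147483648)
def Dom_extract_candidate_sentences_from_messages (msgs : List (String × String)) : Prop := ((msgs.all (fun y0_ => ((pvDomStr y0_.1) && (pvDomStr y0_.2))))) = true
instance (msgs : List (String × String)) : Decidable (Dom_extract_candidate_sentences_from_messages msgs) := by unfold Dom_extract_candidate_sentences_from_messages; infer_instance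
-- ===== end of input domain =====

-- B re-implements A by repeatedly cutting the text at the first '.'/'!'/'?' (slicing instead of a
-- character-by-character buffer) and fuses the case-insensitive dedup into a single dict built
-- inline (dict.setdefault) instead of A's separate set+list second pass; objective: alternative.

-- ===== PORT A =====

-- normalize_text: s.replace("\r"," ").replace("\t"," "), then " ".join(s.split())
def pvNormalize (s : String) : String :=
  PySem.Str.join " " (PySem.Str.split₀ (PySem.Str.replace (PySem.Str.replace s "\r" " ") "\t" " "))

-- ch in ".!?"  (single-character membership in the 3-char string)
def pvDelim (c : Char) : Bool := c == '.' || c == '!' || c == '?'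

-- A's inner 'for ch in t' loop: state (buf, out)
def pvLoopA : List Char → List Char → List String → List Char × List String
  | [], buf, out => (buf, out)
  | c :: cs, buf, out =>
      let buf2 := buf ++ [c]
      if pvDelim c then
        pvLoopA cs []
          (if 6 ≤ (PySem.Chars.strip buf2).length then
              out ++ [String.ofList (PySem.Chars.strip buf2)] else out)
      else pvLoopA cs buf2 out

-- one iteration of A's 'for role, text in msgs' body
def pvMsgA (out : List String) (text : String) : List String :=
  let t := pvNormalize text
  if t.toList = [] then out
  else
    let r := pvLoopA t.toList [] out
    if 12 ≤ (PySem.Chars.strip r.1).length then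
      r.2 ++ [String.ofList (PySem.Chars.strip r.1)]
    else r.2

-- A's final dedup pass: state (seen : set, uniq : list)
def pvDedupA (out : List String) : List String :=
  (out.foldl
    (fun (st : PySem.Set String × List String) s =>
      let k := PySem.Str.lower s
      if PySem.Set.contains st.1 k then st
      else (PySem.Set.add st.1 k, st.2 ++ [s]))
    (PySem.Set.empty, [])).2

def extract_candidate_sentences_from_messages (msgs : List (String × String)) : List String :=
  pvDedupA (msgs.foldl (fun out p => pvMsgA out p.2) [])

-- ===== PORT B =====

-- B's helper _first_delim: index of the first '.'/'!'/'?', None if absent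
def pvFirstDelim : List Char → Option Nat
  | [] => none
  | c :: cs => if pvDelim c then some 0 else (pvFirstDelim cs).map (· + 1)

-- d.setdefault(s.lower(), s)
def pvPush (d : PySem.Dict String String) (s : String) : PySem.Dict String String :=
  d.setdefault (PySem.Str.lower s) s

theorem pvFirstDelim_lt {t : List Char} {i : Nat} (h : pvFirstDelim t = some i) : i < t.length := by
  induction t generalizing i with
  | nil => simp [pvFirstDelim] at h
  | cons c cs ih =>
      simp only [pvFirstDelim] at h
      split at h
      · simp at h; subst h; simp
      · cases hcs : pvFirstDelim cs with
        | none => rw [hcs] at h; simp at h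
        | some j => rw [hcs] at h; simp at h; subst h; have := ih hcs; simp; omega

-- B's 'while True' loop over one normalized text (t[:i+1] is take (i+1), t[i+1:] is drop (i+1),
-- exact for the nonnegative index i)
def pvSentB (t : List Char) (d : PySem.Dict String String) : PySem.Dict String String :=
  match h : pvFirstDelim t with
  | none =>
      let s := PySem.Chars.strip t
      if 12 ≤ s.length then pvPush d (String.ofList s) else d
  | some i =>
      let s := PySem.Chars.strip (t.take (i + 1))
      pvSentB (t.drop (i + 1)) (if 6 ≤ s.length then pvPush d (String.ofList s) else d)
  termination_by t.length
  decreasing_by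
    have := pvFirstDelim_lt h
    simp only [List.length_drop]; omega

def extract_candidate_sentences_from_messages_alt (msgs : List (String × String)) : List String :=
  (msgs.foldl (fun d p => pvSentB (pvNormalize p.2).toList d) PySem.Dict.empty).values

-- ===== PRECONDITION & SPEC =====
def Spec_extract_candidate_sentences_from_messages (msgs : List (String × String)) (out : List String) : Prop := out = extract_candidate_sentences_from_messages_alt msgs
instance (msgs : List (String × String)) (out : List String) : Decidable (Spec_extract_candidate_sentences_from_messages msgs out) := by unfold Spec_extract_candidate_sentences_from_messages; infer_instance

-- ===== CLAIM (what is proved, stated in full; the proofs are below) =====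
def Claim_equal_extract_candidate_sentences_from_messages : Prop := ∀ (msgs : List (String × String)), Dom_extract_candidate_sentences_from_messages msgs → Spec_extract_candidate_sentences_from_messages msgs (extract_candidate_sentences_from_messages msgs)

-- ===== LEMMAS AND PROOFS =====

-- A's per-message candidate list (derived from A's own loop; used only in the proofs)
def pvCandA (t : List Char) : List String :=
  let r := pvLoopA t [] []
  r.2 ++ (if 12 ≤ (PySem.Chars.strip r.1).length then
            [String.ofList (PySem.Chars.strip r.1)] else [])

-- the out-accumulator of pvLoopA only ever grows by appending
theorem pvLoopA_out (cs : List Char) : ∀ buf out,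
    pvLoopA cs buf out = ((pvLoopA cs buf []).1, out ++ (pvLoopA cs buf []).2) := by
  induction cs with
  | nil => intro buf out; simp [pvLoopA]
  | cons c cs ih =>
      intro buf out
      simp only [pvLoopA]
      split
      · split
        · rw [ih _ (out ++ _), ih _ ([] ++ _)]; simp
        · rw [ih _ out]
      · rw [ih _ out]

theorem pvLoopA_fst (cs buf out) : (pvLoopA cs buf out).1 = (pvLoopA cs buf []).1 := by
  rw [pvLoopA_out]

theorem pvLoopA_snd (cs buf out) : (pvLoopA cs buf out).2 = out ++ (pvLoopA cs buf []).2 := by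
  rw [pvLoopA_out]

theorem pvLoopA_no_delim (cs : List Char) (h : ∀ c ∈ cs, pvDelim c = false) :
    ∀ buf out, pvLoopA cs buf out = (buf ++ cs, out) := by
  induction cs with
  | nil => intro buf out; simp [pvLoopA]
  | cons c cs ih =>
      intro buf out
      have hc : pvDelim c = false := h c (by simp)
      simp only [pvLoopA, hc, Bool.false_eq_true, if_false]
      rw [ih (fun x hx => h x (by simp [hx]))]
      simp

theorem pvFirstDelim_none {t : List Char} (h : pvFirstDelim t = none) :
    ∀ c ∈ t, pvDelim c = false := by
  induction t with
  | nil => simp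
  | cons c cs ih =>
      simp only [pvFirstDelim] at h
      split at h
      · simp at h
      · rename_i hc
        have hcs : pvFirstDelim cs = none := by
          cases hcs' : pvFirstDelim cs <;> simp [hcs'] at h ⊢
        intro x hx
        rcases List.mem_cons.mp hx with rfl | hx'
        · simpa using hc
        · exact ih hcs x hx'

theorem pvLoopA_split {t : List Char} {i : Nat} (h : pvFirstDelim t = some i) :
    ∀ buf out, pvLoopA t buf out =
      pvLoopA (t.drop (i + 1)) []
        (if 6 ≤ (PySem.Chars.strip (buf ++ t.take (i + 1))).length then
            out ++ [String.ofList (PySem.Chars.strip (buf ++ t.take (i + 1)))] else out) := by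
  induction t generalizing i with
  | nil => simp [pvFirstDelim] at h
  | cons c cs ih =>
      intro buf out
      simp only [pvFirstDelim] at h
      split at h
      · have hi : i = 0 := by simp_all
        subst hi
        simp_all [pvLoopA]
      · cases hcs : pvFirstDelim cs with
        | none => rw [hcs] at h; simp at h
        | some j =>
            rw [hcs] at h; simp at h; subst h
            have hc : pvDelim c = false := by simp_all
            simp only [pvLoopA, hc, Bool.false_eq_true, if_false]
            rw [ih hcs]
            simp

-- core: B's per-text dict loop is A's candidate list pushed with setdefault
theorem pvSentB_eq_foldl (t : List Char) (d : PySem.Dict String String) :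
    pvSentB t d = (pvCandA t).foldl pvPush d := by
  induction t, d using pvSentB.induct with
  | case1 t d h _s _h12 =>
      rw [pvSentB]
      split
      · simp only [pvCandA, pvLoopA_no_delim t (pvFirstDelim_none h) [] []]
        by_cases hc : 12 ≤ (PySem.Chars.strip t).length <;> simp [hc]
      · rename_i i heq; rw [h] at heq; cases heq
  | case2 t d h _s _h12 =>
      rw [pvSentB]
      split
      · simp only [pvCandA, pvLoopA_no_delim t (pvFirstDelim_none h) [] []]
        by_cases hc : 12 ≤ (PySem.Chars.strip t).length <;> simp [hc]
      · rename_i i heq; rw [h] at heq; cases heq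
  | case3 t d i h sdef ih =>
      rw [pvSentB]
      split
      · rename_i heq; rw [h] at heq; cases heq
      · rename_i j heq
        rw [h] at heq
        injection heq with hji
        subst hji
        change pvSentB _ _ = _
        simp only [dite_eq_ite] at ih
        have hs : sdef = PySem.Chars.strip (List.take (i + 1) t) := rfl
        rw [hs] at ih
        rw [ih]
        simp only [pvCandA, pvLoopA_split h [] [], List.nil_append]
        rw [pvLoopA_out (List.drop (i + 1) t) []
          (if 6 ≤ (PySem.Chars.strip (List.take (i + 1) t)).length then
            [String.ofList (PySem.Chars.strip (List.take (i + 1) t))] else [])]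
        by_cases h6 : 6 ≤ (PySem.Chars.strip (List.take (i + 1) t)).length <;>
          simp [h6, List.foldl_append]

theorem pvMsgA_eq (out : List String) (text : String) :
    pvMsgA out text = out ++ pvCandA (pvNormalize text).toList := by
  simp only [pvMsgA, pvCandA]
  split
  · rename_i hnil
    rw [hnil]
    have h0 : (PySem.Chars.strip ([] : List Char)).length = 0 := by decide
    simp [pvLoopA, h0]
  · rw [pvLoopA_fst, pvLoopA_snd]
    by_cases h12 : 12 ≤ (PySem.Chars.strip (pvLoopA (pvNormalize text).toList [] []).1).length
    · rw [if_pos h12, if_pos h12, ← List.append_assoc]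
    · rw [if_neg h12, if_neg h12, List.append_nil]

-- A's message loop produces the concatenation of the per-message candidates
theorem pvFoldA_eq (msgs : List (String × String)) : ∀ out,
    msgs.foldl (fun out p => pvMsgA out p.2) out
      = out ++ msgs.flatMap (fun p => pvCandA (pvNormalize p.2).toList) := by
  induction msgs with
  | nil => simp
  | cons p ps ih =>
      intro out
      simp only [List.foldl_cons]
      rw [pvMsgA_eq, ih, List.flatMap_cons, List.append_assoc]

-- B's message loop is one pvPush-fold over that same concatenation
theorem pvFoldB_eq (msgs : List (String × String)) : ∀ d,
    msgs.foldl (fun d p => pvSentB (pvNormalize p.2).toList d) d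
      = (msgs.flatMap (fun p => pvCandA (pvNormalize p.2).toList)).foldl pvPush d := by
  induction msgs with
  | nil => simp
  | cons p ps ih =>
      intro d
      simp only [List.foldl_cons, List.flatMap_cons, List.foldl_append]
      rw [pvSentB_eq_foldl, ih]

-- the dedup invariant: A's (seen, uniq) state corresponds to B's dict
theorem pvDedup_eq (L : List String) : ∀ (u : List String) (d : PySem.Dict String String),
    d.items = u.map (fun s => (PySem.Str.lower s, s)) →
    (L.foldl
      (fun (st : PySem.Set String × List String) s =>
        let k := PySem.Str.lower s
        if PySem.Set.contains st.1 k then st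
        else (PySem.Set.add st.1 k, st.2 ++ [s]))
      (u.map PySem.Str.lower, u)).2
      = (L.foldl pvPush d).values := by
  induction L with
  | nil =>
      intro u d hitems
      simp [PySem.Dict.values, hitems, Function.comp_def]
  | cons s L ih =>
      intro u d hitems
      have hkeys : d.keys = u.map PySem.Str.lower := by
        simp [PySem.Dict.keys, hitems, Function.comp_def]
      have hcontains : d.contains (PySem.Str.lower s)
          = PySem.Set.contains (u.map PySem.Str.lower) (PySem.Str.lower s) := by
        rw [PySem.Dict.contains_eq_decide_mem_keys, hkeys,
          PySem.Set.contains_eq_listContains]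
        simp
      simp only [List.foldl_cons, pvPush]
      by_cases hm : PySem.Set.contains (u.map PySem.Str.lower) (PySem.Str.lower s) = true
      · have hct : d.contains (PySem.Str.lower s) = true := by rw [hcontains]; exact hm
        rw [PySem.Dict.setdefault_of_contains _ _ hct, if_pos hm]
        exact ih u d hitems
      · have hcf : d.contains (PySem.Str.lower s) = false := by rw [hcontains]; simpa using hm
        rw [PySem.Dict.setdefault_of_not_contains _ _ hcf, if_neg hm]
        have hadd : PySem.Set.add (u.map PySem.Str.lower) (PySem.Str.lower s)
            = (u ++ [s]).map PySem.Str.lower := by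
          rw [PySem.Set.add_of_not_mem]
          · simp
          · rw [PySem.Set.contains_eq_listContains] at hm
            simpa using hm
        rw [hadd]
        exact ih (u ++ [s]) _ (by
          rw [PySem.Dict.items_insert_of_not_contains _ _ hcf]
          simp [hitems])

-- ===== VERDICT (by name: the statement is the Claim_ definition above) =====
theorem extract_candidate_sentences_from_messages_spec : Claim_equal_extract_candidate_sentences_from_messages := by
  intro msgs _
  show extract_candidate_sentences_from_messages msgs
      = extract_candidate_sentences_from_messages_alt msgs
  unfold extract_candidate_sentences_from_messages
    extract_candidate_sentences_from_messages_alt pvDedupA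
  rw [pvFoldA_eq, pvFoldB_eq]
  simpa using pvDedup_eq (msgs.flatMap (fun p => pvCandA (pvNormalize p.2).toList))
    [] PySem.Dict.empty (by simp [PySem.Dict.empty])
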